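-- pv_equiv track=rewrite | github.com/KORINZ/atcoder | 第11回 アルゴリズム実技検定 過去問/B - 2文字.py | two_words
-- ===== SOURCE A (Python) =====
-- from collections import defaultdict
--
-- def two_words(s: str) -> str:
--     word_dict = defaultdict(int)
--
--     i = 0
--     while i < len(s) - 1:
--         word_dict[s[i] + s[i + 1]] = word_dict[s[i] + s[i + 1]] + 1
--         i += 1
--
--     answer = [k for k, v in word_dict.items() if v == max(word_dict.values())]
--
--     if len(answer) == 1:
--         return answer[0]
--     else:
--         answer.sort()
--         return answer[0]
-- ===== SOURCE B (Python) =====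
-- from itertools import groupby
--
-- def two_words(s: str) -> str:
--     bigrams = sorted(s[i:i + 2] for i in range(len(s) - 1))
--     groups = [(k, len(list(g))) for k, g in groupby(bigrams)]
--     max_count = max(c for _, c in groups)
--     return next(k for k, c in groups if c == max_count)
-- ===== Notes on version B (the rewrite author's own statement) =====
-- stated objective: idiomatic
-- what changed: Replaces the dict-counting pass plus per-item max(values) recomputation, filter and sort over dict keys with: sort the bigram list once, group consecutive equal bigrams (itertools.groupby), and return the first group in sorted order attaining the maximal count.
import Mathlib
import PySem

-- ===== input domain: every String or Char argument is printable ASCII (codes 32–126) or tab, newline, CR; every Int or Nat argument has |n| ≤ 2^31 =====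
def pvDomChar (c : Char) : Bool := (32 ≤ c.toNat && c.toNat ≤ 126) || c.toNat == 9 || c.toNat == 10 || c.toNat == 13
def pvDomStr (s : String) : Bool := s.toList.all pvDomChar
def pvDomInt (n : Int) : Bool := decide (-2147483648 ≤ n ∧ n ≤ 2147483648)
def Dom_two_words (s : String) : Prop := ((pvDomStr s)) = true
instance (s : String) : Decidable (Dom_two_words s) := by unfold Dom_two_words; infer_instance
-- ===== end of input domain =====

-- B replaces A's dict-counting pass by sort-the-bigrams + itertools.groupby run-length grouping, returning the
-- first most-frequent group of the sorted order (objective: idiomatic; no speed claim).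

-- ===== PORT A =====
-- Python bigram strings are built as String.ofList of the two characters; the pyGetD ' ' defaults are never
-- used: the loop index keeps both reads in range.
def two_words (s : String) : String :=
  let cs := s.toList
  let d : PySem.Dict String Int :=
    (PySem.List.pyRange 0 ((cs.length : Int) - 1) 1).foldl
      (fun d i =>
        d.insert (String.ofList [PySem.List.pyGetD cs i ' ', PySem.List.pyGetD cs (i + 1) ' '])
          (d.getD (String.ofList [PySem.List.pyGetD cs i ' ', PySem.List.pyGetD cs (i + 1) ' ']) 0 + 1))
      PySem.Dict.empty
  let answer := (d.items.filter
      (fun kv => some kv.2 == PySem.List.max? d.values (fun v => v))).map (·.1)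
  if answer.length == 1 then
    (PySem.List.pyGet? answer 0).getD ""
  else
    (PySem.List.pyGet? (PySem.List.sorted answer (fun x => x) false) 0).getD ""

-- ===== PORT B =====
-- itertools.groupby on the sorted list = run-length grouping of consecutive equal elements.
def pvGroups : List String → List (String × Int)
  | [] => []
  | x :: t =>
    match pvGroups t with
    | [] => [(x, 1)]
    | (y, c) :: rest => if x = y then (x, c + 1) :: rest else (x, 1) :: (y, c) :: rest

def two_words_alt (s : String) : String :=
  let cs := s.toList
  let bigrams := PySem.List.sorted
      ((PySem.List.pyRange 0 ((cs.length : Int) - 1) 1).map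
        (fun i => String.ofList (PySem.List.slice cs (some i) (some (i + 2))))) (fun x => x) false
  let groups := pvGroups bigrams
  match PySem.List.max? (groups.map (·.2)) (fun c => c) with
  | none => ""
  | some m =>
    match groups.find? (fun g => g.2 == m) with
    | some g => g.1
    | none => ""
-- ===== PRECONDITION & SPEC =====
-- A raises on strings of length < 2 (IndexError on answer[0]); B's max() raises ValueError there.
def Pre_two_words (s : String) : Prop := 2 ≤ s.toList.length
instance (s : String) : Decidable (Pre_two_words s) := by unfold Pre_two_words; infer_instance
def pvWitness_two_words : String := "abab"
def Spec_two_words (s : String) (out : String) : Prop := out = two_words_alt s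
instance (s : String) (out : String) : Decidable (Spec_two_words s out) := by unfold Spec_two_words; infer_instance

-- ===== CLAIM (what is proved, stated in full; the proofs are below) =====
def Claim_equal_two_words : Prop := ∀ (s : String), Dom_two_words s → Pre_two_words s → Spec_two_words s (two_words s)

-- ===== LEMMAS AND PROOFS =====

theorem pvGroups_cons (x : String) (t : List String) :
    pvGroups (x :: t) = match pvGroups t with
      | [] => [(x, 1)]
      | (y, c) :: rest => if x = y then (x, c + 1) :: rest else (x, 1) :: (y, c) :: rest := rfl

theorem pvGroups_cons_head (x : String) (t : List String) :
    ∃ c rest, pvGroups (x :: t) = (x, c) :: rest := by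
  cases h : pvGroups t with
  | nil => exact ⟨1, [], by simp [pvGroups_cons, h]⟩
  | cons p rest =>
    obtain ⟨y, c⟩ := p
    by_cases hxy : x = y
    · exact ⟨c + 1, rest, by simp [pvGroups_cons, h, hxy]⟩
    · exact ⟨1, (y, c) :: rest, by simp [pvGroups_cons, h, hxy]⟩

theorem pvDiscard_of_not_mem {x : String} {s : List String} (h : x ∉ s) :
    PySem.Set.discard s x = s := by
  simp only [PySem.Set.discard]
  apply List.filter_eq_self.mpr
  intro y hy
  simp only [Bool.not_eq_true', beq_eq_false_iff_ne, ne_eq]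
  exact fun he => h (he ▸ hy)

theorem pvGroups_sorted (ys : List String) (hs : ys.Pairwise (· ≤ ·)) :
    pvGroups ys = (PySem.List.dedup ys).map (fun k => (k, (ys.count k : Int))) := by
  induction ys with
  | nil => rfl
  | cons x t ih =>
    have hx : ∀ y ∈ t, x ≤ y := fun y hy => List.rel_of_pairwise_cons hs hy
    have ht : t.Pairwise (· ≤ ·) := hs.of_cons
    have iht := ih ht
    rw [PySem.List.dedup_eq_ofList] at iht ⊢
    rw [PySem.Set.ofList_cons]
    cases t with
    | nil => simp [pvGroups, PySem.Set.ofList, PySem.Set.discard]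
    | cons z t' =>
      obtain ⟨c, rest, hg⟩ := pvGroups_cons_head z t'
      have hndt : (PySem.Set.ofList (z :: t') : List String).Nodup := PySem.Set.nodup_ofList _
      by_cases hxz : x = z
      · subst hxz
        rw [PySem.Set.ofList_cons] at iht hndt
        have hznotin : x ∉ (PySem.Set.ofList t').discard x := (List.nodup_cons.mp hndt).1
        rw [hg] at iht
        simp only [List.map_cons, List.cons.injEq, Prod.mk.injEq] at iht
        obtain ⟨⟨-, hc⟩, hrest⟩ := iht
        rw [pvGroups_cons, hg]
        show (if x = x then (x, c + 1) :: rest else (x, 1) :: (x, c) :: rest) = _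
        rw [if_pos rfl]
        rw [PySem.Set.ofList_cons]
        have hd1 : PySem.Set.discard (x :: (PySem.Set.ofList t').discard x) x
            = (PySem.Set.ofList t').discard x := by
          simp [PySem.Set.discard, List.filter_filter]
        rw [hd1]
        refine List.cons_eq_cons.mpr ⟨?_, ?_⟩
        · show (x, c + 1) = (x, ((x :: x :: t').count x : Int))
          simp only [Prod.mk.injEq, true_and, hc, List.count_cons_self]
          push_cast
          ring
        · rw [hrest]
          apply List.map_congr_left
          intro k hk
          have hkne : k ≠ x := fun he => hznotin (he ▸ hk)
          simp [Ne.symm hkne]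
      · have hxnot : x ∉ (z :: t' : List String) := by
          intro hmem
          rcases List.mem_cons.mp hmem with h1 | h2
          · exact hxz h1
          · exact hxz (le_antisymm (hx z List.mem_cons_self) (List.rel_of_pairwise_cons ht h2))
        rw [pvGroups_cons, hg]
        show (if x = z then (x, c + 1) :: rest else (x, 1) :: (z, c) :: rest) = _
        rw [if_neg hxz]
        rw [pvDiscard_of_not_mem (fun hm => hxnot ((PySem.Set.mem_ofList _ _).mp hm))]
        rw [List.map_cons]
        refine List.cons_eq_cons.mpr ⟨?_, ?_⟩
        · show (x, (1 : Int)) = (x, ((x :: z :: t').count x : Int))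
          simp only [Prod.mk.injEq, true_and]
          rw [List.count_cons_self, List.count_eq_zero.mpr hxnot]
          simp
        · rw [← hg, iht]
          apply List.map_congr_left
          intro k hk
          have hkmem : k ∈ (z :: t' : List String) := (PySem.Set.mem_ofList _ _).mp hk
          have hkne : k ≠ x := fun he => hxnot (he ▸ hkmem)
          simp [List.count_cons, Ne.symm hkne]

theorem pvOfList_sublist (xs : List String) : (PySem.Set.ofList xs).Sublist xs := by
  induction xs with
  | nil => simp [PySem.Set.ofList]
  | cons x t ih =>
    rw [PySem.Set.ofList_cons]
    refine List.Sublist.cons₂ x (List.Sublist.trans ?_ ih)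
    simp only [PySem.Set.discard]
    exact List.filter_sublist

theorem pvFind?_eq_head?_filter {α : Type} (l : List α) (p : α → Bool) :
    l.find? p = (l.filter p).head? := by
  induction l with
  | nil => rfl
  | cons x t ih =>
    by_cases h : p x
    · rw [List.find?_cons_of_pos h, List.filter_cons, if_pos h, List.head?_cons]
    · simp only [Bool.not_eq_true] at h
      rw [List.find?_cons_of_neg (by simp [h]), List.filter_cons, if_neg (by simp [h]), ih]

theorem pvMax?_eq_of_perm (l1 l2 : List Int) (hp : l1.Perm l2) :
    PySem.List.max? l1 (fun v => v) = PySem.List.max? l2 (fun v => v) := by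
  cases h1 : PySem.List.max? l1 (fun v => v) with
  | none =>
    rw [PySem.List.max?_eq_none_iff] at h1
    subst h1
    rw [List.perm_nil.mp hp.symm]
    rfl
  | some m1 =>
    cases h2 : PySem.List.max? l2 (fun v => v) with
    | none =>
      rw [PySem.List.max?_eq_none_iff] at h2
      subst h2
      rw [List.perm_nil.mp hp] at h1
      rw [(PySem.List.max?_eq_none_iff ([] : List Int) (fun v => v)).mpr rfl] at h1
      cases h1
    | some m2 =>
      have hm1 := PySem.List.max?_mem h1
      have hm2 := PySem.List.max?_mem h2
      have hle1 := PySem.List.max?_isMax h1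
      have hle2 := PySem.List.max?_isMax h2
      have : m1 = m2 := le_antisymm (hle2 m1 (hp.mem_iff.mp hm1)) (hle1 m2 (hp.mem_iff.mpr hm2))
      rw [this]

theorem main_eq (s : String) (hpre : 2 ≤ s.toList.length) : two_words s = two_words_alt s := by
  set cs := s.toList with hcs
  set n := cs.length with hn
  set L : List String :=
    (PySem.List.pyRange 0 ((n : Int) - 1) 1).map
      (fun i => String.ofList (PySem.List.slice cs (some i) (some (i + 2)))) with hL
  have hkeys : (PySem.List.pyRange 0 ((n : Int) - 1) 1).map
      (fun i => String.ofList [PySem.List.pyGetD cs i ' ', PySem.List.pyGetD cs (i + 1) ' ']) = L := by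
    apply List.map_congr_left
    intro i hi
    obtain ⟨h0, h1⟩ := PySem.List.mem_pyRange_one.mp hi
    refine congrArg String.ofList ?_
    have ht : (i + 2).toNat - i.toNat = 2 := by omega
    rw [PySem.List.slice_toNat cs h0 (by omega), ht]
    rw [PySem.List.pyGetD_eq_getElem cs ' ' h0 (by omega),
        PySem.List.pyGetD_eq_getElem cs ' ' (by omega) (by omega)]
    have h3 : (i + 1).toNat = i.toNat + 1 := by omega
    simp only [h3]
    rw [List.drop_eq_getElem_cons (show i.toNat < cs.length by omega),
        List.drop_eq_getElem_cons (show i.toNat + 1 < cs.length by omega)]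
    rfl
  have hdict : (PySem.List.pyRange 0 ((n : Int) - 1) 1).foldl
      (fun d i =>
        d.insert (String.ofList [PySem.List.pyGetD cs i ' ', PySem.List.pyGetD cs (i + 1) ' '])
          (d.getD (String.ofList [PySem.List.pyGetD cs i ' ', PySem.List.pyGetD cs (i + 1) ' ']) 0 + 1))
      PySem.Dict.empty = PySem.Dict.counter L := by
    rw [← PySem.Dict.foldl_insert_getD_add_one_eq_counter L, ← hkeys, List.foldl_map]
  have hLne : L ≠ [] := by
    intro h
    have := congrArg List.length h
    simp [hL, PySem.List.length_pyRange_one] at this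
    omega
  set S : List String := PySem.Set.ofList L with hS
  set cnt : String → Int := fun k => (L.count k : Int) with hcnt
  set f : String → String × Int := fun k => (k, cnt k) with hf
  have hitems : (PySem.Dict.counter L).items = S.map f := PySem.Dict.items_counter L
  have hvalues : (PySem.Dict.counter L).values = S.map cnt := by
    simp only [PySem.Dict.values, hitems, List.map_map]
    rfl
  obtain ⟨M, hM⟩ : ∃ M, PySem.List.max? (S.map cnt) (fun v => v) = some M := by
    cases h : PySem.List.max? (S.map cnt) (fun v => v) with
    | none =>
      rw [PySem.List.max?_eq_none_iff, List.map_eq_nil_iff] at h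
      obtain ⟨x, tx, hx⟩ := List.exists_cons_of_ne_nil hLne
      have hxS : x ∈ S := (PySem.Set.mem_ofList _ _).mpr (by rw [hx]; exact List.mem_cons_self)
      rw [h] at hxS
      cases hxS
    | some m => exact ⟨m, rfl⟩
  set bigrams := PySem.List.sorted L (fun x => x) false with hbig
  have hbigPerm : bigrams.Perm L := PySem.List.sorted_perm L (fun x => x) false
  have hbigPW : bigrams.Pairwise (· ≤ ·) := PySem.List.sorted_pairwise L (fun x => x)
  have hdd : PySem.List.dedup bigrams = PySem.List.sorted S (fun x => x) false := by
    symm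
    apply PySem.List.sorted_eq_of_perm_of_pairwise_lt
    · refine (List.perm_ext_iff_of_nodup ?_ ?_).mpr ?_
      · rw [PySem.List.dedup_eq_ofList]; exact PySem.Set.nodup_ofList _
      · exact PySem.Set.nodup_ofList _
      · intro a
        rw [PySem.List.dedup_eq_ofList, PySem.Set.mem_ofList, PySem.Set.mem_ofList,
          List.Perm.mem_iff hbigPerm]
    · have hsub : (PySem.List.dedup bigrams).Sublist bigrams := by
        rw [PySem.List.dedup_eq_ofList]; exact pvOfList_sublist bigrams
      have h1 : (PySem.List.dedup bigrams).Pairwise (· ≤ ·) := List.Pairwise.sublist hsub hbigPW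
      have h2 : (PySem.List.dedup bigrams).Nodup := by
        rw [PySem.List.dedup_eq_ofList]; exact PySem.Set.nodup_ofList _
      exact (h1.and h2).imp (fun h => lt_of_le_of_ne h.1 h.2)
  have hgr : pvGroups bigrams = (PySem.List.sorted S (fun x => x) false).map f := by
    rw [pvGroups_sorted bigrams hbigPW, hdd]
    apply List.map_congr_left
    intro k _
    simp only [hbigPerm.count_eq k, hf]
    rfl
  have hsortSperm : (PySem.List.sorted S (fun x => x) false).Perm S :=
    PySem.List.sorted_perm S (fun x => x) false
  have hmaxB : PySem.List.max? ((pvGroups bigrams).map (·.2)) (fun c => c) = some M := by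
    rw [hgr, List.map_map]
    have hsnd : ((fun x : String × Int => x.2) ∘ f) = cnt := rfl
    rw [hsnd, pvMax?_eq_of_perm _ (S.map cnt) (hsortSperm.map cnt), ← hM]
  set q : String → Bool := fun k => cnt k == M with hq
  have hanswer : ((PySem.Dict.counter L).items.filter
      (fun kv => some kv.2 == PySem.List.max? ((PySem.Dict.counter L).values) (fun v => v))).map
        (·.1) = S.filter q := by
    rw [hvalues, hM, hitems, List.filter_map, List.map_map]
    have hpred : ((fun kv : String × Int => some kv.2 == some M) ∘ f) = q := by
      funext k
      simp [hf, hq]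
    rw [hpred]
    have hfst : ((fun x : String × Int => x.1) ∘ f) = id := by funext k; rfl
    rw [hfst, List.map_id]
  set F := (PySem.List.sorted S (fun x => x) false).filter q with hF
  have hFsorted : PySem.List.sorted (S.filter q) (fun x => x) false = F := by
    apply PySem.List.sorted_eq_of_perm_of_pairwise_lt
    · exact hsortSperm.filter q
    · exact List.Pairwise.sublist List.filter_sublist (PySem.List.sorted_ofList_pairwise_lt L)
  have hFne : F ≠ [] := by
    obtain ⟨k0, hk0S, hk0⟩ := List.mem_map.mp (PySem.List.max?_mem hM)
    intro h
    have hmemF : k0 ∈ F := by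
      rw [hF, List.mem_filter]
      exact ⟨(PySem.List.mem_sorted _ _ _ _).mpr hk0S, by simp [hq, hk0]⟩
    rw [h] at hmemF
    cases hmemF
  obtain ⟨hd, tl, hFcons⟩ := List.exists_cons_of_ne_nil hFne
  have hB : two_words_alt s = hd := by
    rw [two_words_alt]
    simp only [← hcs, ← hn, ← hL, ← hbig]
    rw [hmaxB]
    show (match (pvGroups bigrams).find? (fun g => g.2 == M) with
      | some g => g.1
      | none => "") = hd
    rw [hgr, List.find?_map]
    have hpred : ((fun g : String × Int => g.2 == M) ∘ f) = q := rfl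
    rw [hpred, pvFind?_eq_head?_filter, ← hF, hFcons]
    rfl
  rw [hB, two_words]
  simp only [← hcs, ← hn]
  rw [hdict, hanswer]
  by_cases hlen : (S.filter q).length = 1
  · obtain ⟨a, ha⟩ := List.length_eq_one_iff.mp hlen
    have hFa : F = [a] := by
      rw [← hFsorted, ha]
      rfl
    rw [hFcons] at hFa
    simp only [List.cons.injEq] at hFa
    rw [ha]
    simp [PySem.List.pyGet?, hFa.1]
    rfl
  · have hcond : ¬((((S.filter q).length == 1) : Bool) = true) := by
      simp only [beq_iff_eq]
      exact hlen
    rw [if_neg hcond, hFsorted, hFcons]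
    simp [PySem.List.pyGet?, PySem.List.pyIdx?]

-- ===== VERDICT (by name: the statement is the Claim_ definition above) =====
theorem two_words_spec : Claim_equal_two_words := by
  intro s _ hpre
  unfold Spec_two_words
  exact main_eq s hpre
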